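-- pv_equiv track=rewrite | github.com/subhendudash02/PoD-VITCC | Code_word.py | vowel_c
-- ===== SOURCE A (Python) =====
-- def issame(lis):
--     a = lis[0]
--     for i in range(1, len(lis)):
--         if lis[i] != a:
--             return False
--     else:
--         return True
--
-- def vowel_c(li):
--     v = ['A', 'E', 'I', 'O', 'U']
--     k = []
--     for i in li:
--         c = 0
--         for j in i:
--             if j in v:
--                 c += 1
--         k.append(c)
--
--     if issame(k):
--         return True
--     else:
--         return False
-- ===== SOURCE B (Python) =====
-- def vowel_c(li):
--     return len({sum(s.count(v) for v in 'AEIOU') for s in li}) == 1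
-- ===== Notes on version B (the rewrite author's own statement) =====
-- stated objective: idiomatic
-- what changed: B replaces A's per-character membership loop, intermediate count list and separate issame scan by counting each vowel with str.count (traversal by vowel, not by char) and collecting the counts into a set whose cardinality decides the answer.
import Mathlib
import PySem

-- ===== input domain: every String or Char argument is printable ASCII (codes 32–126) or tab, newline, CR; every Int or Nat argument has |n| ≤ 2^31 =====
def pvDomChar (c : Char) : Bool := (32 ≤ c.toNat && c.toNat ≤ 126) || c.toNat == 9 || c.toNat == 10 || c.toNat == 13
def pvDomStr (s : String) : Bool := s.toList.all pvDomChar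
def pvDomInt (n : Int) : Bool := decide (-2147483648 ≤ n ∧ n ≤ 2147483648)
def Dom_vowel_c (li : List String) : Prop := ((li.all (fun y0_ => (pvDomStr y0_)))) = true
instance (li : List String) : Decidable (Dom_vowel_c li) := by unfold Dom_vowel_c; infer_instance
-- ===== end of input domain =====

-- B replaces A's per-char loop + count list + issame scan by per-vowel str.count
-- and a set of counts whose cardinality decides the answer; objective: idiomatic.

-- ===== PORT A =====
-- issame: a = lis[0] (IndexError on []), then loop over indices 1.. comparing to a.
-- The [] case is unreachable under Pre_vowel_c (Python raises IndexError there).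
def issame (lis : List Int) : Bool :=
  match lis with
  | [] => false
  | a :: rest => rest.all (fun x => x == a)

def vowel_c (li : List String) : Bool :=
  let v : List Char := ['A', 'E', 'I', 'O', 'U']
  let k := li.foldl
    (fun k i =>
      k ++ [i.toList.foldl (fun c j => if v.contains j then c + 1 else c) (0 : Int)])
    ([] : List Int)
  if issame k then true else false

-- ===== PORT B =====
-- sum(s.count(v) for v in 'AEIOU')
def vowelSum (s : String) : Int :=
  "AEIOU".toList.foldl (fun acc v => acc + (PySem.Str.count s (String.singleton v) : Int)) 0

-- len({vowelSum(s) for s in li}) == 1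
def vowel_c_alt (li : List String) : Bool :=
  PySem.Set.len (PySem.Set.ofList (li.map vowelSum)) == 1

-- ===== PRECONDITION & SPEC =====
-- Pre_ excludes only the empty list, on which Python A raises IndexError (lis[0]).
def Pre_vowel_c (li : List String) : Prop := li ≠ []
instance (li : List String) : Decidable (Pre_vowel_c li) := by unfold Pre_vowel_c; infer_instance
def pvWitness_vowel_c : List String := ["AE", "EA"]
def Spec_vowel_c (li : List String) (out : Bool) : Prop := out = vowel_c_alt li
instance (li : List String) (out : Bool) : Decidable (Spec_vowel_c li out) := by unfold Spec_vowel_c; infer_instance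

-- ===== CLAIM (what is proved, stated in full; the proofs are below) =====
def Claim_equal_vowel_c : Prop := ∀ (li : List String), Dom_vowel_c li → Pre_vowel_c li → Spec_vowel_c li (vowel_c li)

-- ===== LEMMAS AND PROOFS =====

-- count.go with a single-char needle counts occurrences of that char.
theorem count_go_single (v : Char) (l : List Char) : ∀ (fuel acc : Nat),
    l.length ≤ fuel → PySem.Chars.count.go [v] fuel l acc = acc + l.count v := by
  induction l with
  | nil =>
    intro fuel acc _
    cases fuel <;> simp [PySem.Chars.count.go]
  | cons h t ih =>
    intro fuel acc hf
    cases fuel with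
    | zero => simp at hf
    | succ n =>
      rw [PySem.Chars.count.go]
      simp only [List.isPrefixOf, Bool.and_true, List.length_cons,
        List.drop_succ_cons, List.length_nil, List.drop_zero]
      have hf' : t.length ≤ n := by simpa using hf
      by_cases hv : (v == h) = true
      · simp only [hv, if_true]
        rw [ih n (acc + 1) hf']
        have : h = v := (beq_iff_eq.mp hv).symm
        subst this
        simp
        omega
      · have hvf : (v == h) = false := by simpa using hv
        simp only [hvf, Bool.false_eq_true, if_false]
        rw [ih n acc hf']
        have hne : ¬ h = v := fun hh => by simp [hh] at hvf
        simp [hne]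

-- single-char substring count = char count
theorem count_single (s : List Char) (v : Char) :
    PySem.Chars.count s [v] = s.count v := by
  have := count_go_single v s s.length 0 le_rfl
  simpa [PySem.Chars.count] using this

-- the five per-vowel counts sum to the per-char vowel count
theorem count5 (l : List Char) :
    ((l.count 'A' : Int) + l.count 'E' + l.count 'I' + l.count 'O' + l.count 'U')
      = (l.countP (fun j => (['A','E','I','O','U'] : List Char).contains j) : Int) := by
  induction l with
  | nil => simp
  | cons c t ih =>
    simp only [List.count_cons, List.countP_cons]
    push_cast
    by_cases h1 : c = 'A' <;> by_cases h2 : c = 'E' <;> by_cases h3 : c = 'I' <;>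
      by_cases h4 : c = 'O' <;> by_cases h5 : c = 'U' <;>
      simp_all [List.contains_eq_mem] <;> omega

-- vowelSum computes the per-char vowel count of A's inner loop.
theorem vowelSum_eq (s : String) :
    vowelSum s = (s.toList.countP (fun j => (['A','E','I','O','U'] : List Char).contains j) : Int) := by
  have hAE : "AEIOU".toList = ['A','E','I','O','U'] := rfl
  simp only [vowelSum, hAE, List.foldl, PySem.Str.count_eq, String.toList_singleton, count_single]
  have := count5 s.toList
  push_cast at this ⊢
  omega

-- the k-list of A is the map of vowel counts
theorem build_k_eq (li : List String) :
    li.foldl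
      (fun k i =>
        k ++ [i.toList.foldl (fun c j => if (['A','E','I','O','U'] : List Char).contains j then c + 1 else c) (0 : Int)])
      ([] : List Int) = li.map vowelSum := by
  rw [PySem.List.foldl_append_singleton_eq_map]
  simp only [List.nil_append]
  apply List.map_congr_left
  intro s _
  rw [PySem.List.foldl_if_add_one, vowelSum_eq, zero_add]

-- a nonempty list has all elements equal to its head iff its set of elements is a singleton
theorem allhead_iff_set_len (a : Int) (rest : List Int) :
    (∀ x ∈ rest, x = a) ↔ (PySem.Set.ofList (a :: rest)).length = 1 := by
  constructor
  · intro h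
    have hsub : ∀ x ∈ PySem.Set.ofList (a :: rest), x = a := by
      intro x hx
      rcases List.mem_cons.1 ((PySem.Set.mem_ofList _ _).1 hx) with rfl | hm
      · rfl
      · exact h _ hm
    have ha : a ∈ PySem.Set.ofList (a :: rest) :=
      (PySem.Set.mem_ofList _ _).2 (List.mem_cons_self)
    have hnd := PySem.Set.nodup_ofList (a :: rest)
    match hs : PySem.Set.ofList (a :: rest) with
    | [] => rw [hs] at ha; simp at ha
    | [y] => rfl
    | y :: z :: zs =>
      rw [hs] at hsub hnd
      have hy : y = a := hsub y (by simp)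
      have hz : z = a := hsub z (by simp)
      rw [List.nodup_cons] at hnd
      exact absurd (by simp [hy, hz]) hnd.1
  · intro h x hx
    obtain ⟨y, hy⟩ := List.length_eq_one_iff.1 h
    have ha : a ∈ PySem.Set.ofList (a :: rest) :=
      (PySem.Set.mem_ofList _ _).2 (List.mem_cons_self)
    rw [hy] at ha
    have hya : a = y := by simpa using ha
    have hxm : x ∈ PySem.Set.ofList (a :: rest) :=
      (PySem.Set.mem_ofList _ _).2 (List.mem_cons_of_mem _ hx)
    rw [hy, ← hya] at hxm
    simpa using hxm

-- issame on a nonempty count list equals B's set-cardinality test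
theorem issame_iff_set (a : Int) (rest : List Int) :
    issame (a :: rest) = (PySem.Set.len (PySem.Set.ofList (a :: rest)) == 1) := by
  by_cases h : ∀ x ∈ rest, x = a
  · have h2 := (allhead_iff_set_len a rest).1 h
    simp [issame, List.all_eq_true, PySem.Set.len, h2]
    intro x hx
    exact h x hx
  · have h2 : (PySem.Set.ofList (a :: rest)).length ≠ 1 :=
      fun hc => h ((allhead_iff_set_len a rest).2 hc)
    have h1 : issame (a :: rest) = false := by
      obtain ⟨x, hx, hne⟩ := not_forall₂.mp h
      simp only [issame]
      rw [List.all_eq_false]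
      exact ⟨x, hx, by simpa using hne⟩
    rw [h1]
    have : (PySem.Set.len (PySem.Set.ofList (a :: rest)) == 1) = false := by
      simp [PySem.Set.len]
      omega
    rw [this]

-- ===== VERDICT (by name: the statement is the Claim_ definition above) =====
theorem vowel_c_spec : Claim_equal_vowel_c := by
  intro li _ hpre
  unfold Spec_vowel_c
  match li with
  | [] => exact absurd rfl hpre
  | h :: t =>
    show vowel_c (h :: t) = vowel_c_alt (h :: t)
    simp only [vowel_c, vowel_c_alt]
    rw [build_k_eq]
    simp only [List.map_cons, issame_iff_set]
    cases hB : (PySem.Set.len (PySem.Set.ofList (vowelSum h :: t.map vowelSum)) == 1) <;> simp
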